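-- pv_equiv track=rewrite | github.com/sim1234/Simpack | phisics.py | iterate_over_PhisicsObjects
-- ===== SOURCE A (Python) =====
-- def iterate_over_PhisicsObjects(lista):
--     x = 0
--     while x < len(lista):
--         o = lista[x]
--         if o:
--             x += 1
--             yield o
--         else:
--             lista.pop(x)
-- ===== SOURCE B (Python) =====
-- def iterate_over_PhisicsObjects(lista):
--     # Filter truthy elements once, compact the list in place,
--     # then yield the kept elements. Same yields and same final list as A.
--     kept = [o for o in lista if o]
--     lista[:] = kept
--     yield from kept
-- ===== Notes on version B (the rewrite author's own statement) =====
-- stated objective: simpler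
-- what changed: A walks an index over the list in a while loop, yielding truthy elements and calling list.pop(x) on falsy ones; B builds the filtered list in one comprehension, compacts the list with a single slice assignment, and yields from it (no index bookkeeping, no per-element pop).
import Mathlib
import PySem

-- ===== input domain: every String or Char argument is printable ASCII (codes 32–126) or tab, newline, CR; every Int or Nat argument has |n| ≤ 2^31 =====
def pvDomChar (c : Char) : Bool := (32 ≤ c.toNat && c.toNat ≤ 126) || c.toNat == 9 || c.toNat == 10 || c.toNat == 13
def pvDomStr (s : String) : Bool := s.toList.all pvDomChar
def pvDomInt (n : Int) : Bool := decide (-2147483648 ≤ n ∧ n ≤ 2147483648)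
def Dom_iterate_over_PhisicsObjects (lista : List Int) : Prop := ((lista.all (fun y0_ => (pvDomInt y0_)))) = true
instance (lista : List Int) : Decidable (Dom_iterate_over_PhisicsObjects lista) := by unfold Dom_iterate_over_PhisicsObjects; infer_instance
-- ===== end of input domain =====

-- B replaces A's index-walking while loop with per-element pop() by a single filter pass plus one slice assignment (simpler; same result).
-- Side effect: both A and B mutate lista in place (final list = truthy elements); the equivalence proved here is about the yielded values only.
-- ===== PORT A =====
-- literal port of A's while loop: state is the index x, the (mutated) list l, and the yields so far
def pvALoop (x : Nat) (l : List Int) (acc : List Int) : List Int :=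
  if h : x < l.length then
    let o := l[x]
    if o ≠ 0 then
      pvALoop (x + 1) l (acc ++ [o])
    else
      pvALoop x (l.eraseIdx x) acc
  else acc
termination_by l.length - x
decreasing_by
  · omega
  · have := List.length_eraseIdx_of_lt h; omega

def iterate_over_PhisicsObjects (lista : List Int) : List Int :=
  pvALoop 0 lista []

-- ===== PORT B =====
def iterate_over_PhisicsObjects_alt (lista : List Int) : List Int :=
  lista.filter (fun o => o != 0)

-- ===== PRECONDITION & SPEC =====
def Spec_iterate_over_PhisicsObjects (lista : List Int) (out : List Int) : Prop := out = iterate_over_PhisicsObjects_alt lista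
instance (lista : List Int) (out : List Int) : Decidable (Spec_iterate_over_PhisicsObjects lista out) := by unfold Spec_iterate_over_PhisicsObjects; infer_instance

-- ===== CLAIM (what is proved, stated in full; the proofs are below) =====
def Claim_equal_iterate_over_PhisicsObjects : Prop := ∀ (lista : List Int), Dom_iterate_over_PhisicsObjects lista → Spec_iterate_over_PhisicsObjects lista (iterate_over_PhisicsObjects lista)

-- ===== LEMMAS AND PROOFS =====

theorem pvALoop_eq (x : Nat) (l : List Int) (acc : List Int) :
    pvALoop x l acc = acc ++ (l.drop x).filter (fun o => o != 0) := by
  fun_induction pvALoop x l acc with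
  | case1 x l acc h o ho ih =>
      rw [ih, List.drop_eq_getElem_cons h, List.filter_cons]
      have : (l[x] != 0) = true := by simpa [o] using ho
      simp [this, o, List.append_assoc]
  | case2 x l acc h o ho ih =>
      rw [ih]
      have hx : x ≤ l.length := le_of_lt h
      have hd : (l.eraseIdx x).drop x = l.drop (x + 1) := by
        rw [List.eraseIdx_eq_take_drop_succ, List.drop_append_of_le_length (by simp [hx]),
          List.drop_take]
        simp
      rw [hd, List.drop_eq_getElem_cons h]
      have : o = (0 : Int) := by omega
      simp [List.filter, o, this]
  | case3 x l acc h =>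
      rw [List.drop_of_length_le (by omega)]
      simp

-- ===== VERDICT (by name: the statement is the Claim_ definition above) =====
theorem iterate_over_PhisicsObjects_spec : Claim_equal_iterate_over_PhisicsObjects := by
  intro lista _
  unfold Spec_iterate_over_PhisicsObjects iterate_over_PhisicsObjects iterate_over_PhisicsObjects_alt
  simp [pvALoop_eq]
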